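-- pv_equiv track=rewrite | github.com/Muhammedyilmaz56/server_client | server/crypto_algorithms.py | playfair_prepare_text
-- ===== SOURCE A (Python) =====
-- def normalize_text(text):
--     mapping = str.maketrans("ığüşöçİĞÜŞÖÇ", "igusocIGUSOC")
--     return text.translate(mapping)
--
-- def playfair_prepare_text(text):
--     text = normalize_text(text.lower().replace("j", "i"))
--     cleaned = [c for c in text if c.isalpha()]
--     pairs = []
--     i = 0
--     while i < len(cleaned):
--         a = cleaned[i]
--         b = ''
--         if i + 1 < len(cleaned):
--             b = cleaned[i + 1]
--         if a == b:
--             pairs.append((a, 'x'))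
--             i += 1
--         else:
--             if b:
--                 pairs.append((a, b))
--                 i += 2
--             else:
--                 pairs.append((a, 'x'))
--                 i += 1
--     return pairs
-- ===== SOURCE B (Python) =====
-- def normalize_text(text):
--     mapping = str.maketrans("ığüşöçİĞÜŞÖÇ", "igusocIGUSOC")
--     return text.translate(mapping)
--
-- def playfair_prepare_text(text):
--     text = normalize_text(text.lower().replace("j", "i"))
--     pairs = []
--     pending = None
--     for c in text:
--         if not c.isalpha():
--             continue
--         if pending is None:
--             pending = c
--         elif pending == c:
--             pairs.append((pending, 'x'))
--             pending = c
--         else: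
--             pairs.append((pending, c))
--             pending = None
--     if pending is not None:
--         pairs.append((pending, 'x'))
--     return pairs
-- ===== Notes on version B (the rewrite author's own statement) =====
-- stated objective: simpler
-- what changed: Replaces the index-based while loop with lookahead and variable stride (i+=1/i+=2) by a single forward pass over the characters maintaining one 'pending' character, fusing the isalpha filtering into the same pass.
import Mathlib
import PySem

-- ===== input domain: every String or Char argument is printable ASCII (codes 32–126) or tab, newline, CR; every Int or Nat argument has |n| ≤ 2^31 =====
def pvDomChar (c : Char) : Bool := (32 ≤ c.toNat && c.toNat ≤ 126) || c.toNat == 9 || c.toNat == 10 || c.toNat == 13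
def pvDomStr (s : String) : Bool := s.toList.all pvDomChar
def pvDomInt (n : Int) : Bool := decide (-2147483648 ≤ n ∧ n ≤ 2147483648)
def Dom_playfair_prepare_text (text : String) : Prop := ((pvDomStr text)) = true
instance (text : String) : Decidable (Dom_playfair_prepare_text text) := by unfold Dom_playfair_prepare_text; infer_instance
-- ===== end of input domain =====

-- B replaces A's index-based while loop with lookahead and variable stride by a single
-- forward pass holding one 'pending' character (objective: simpler decomposition).

set_option maxHeartbeats 1000000


-- ===== PORT A =====
-- str.maketrans/translate of the Turkish letters: a per-character map (identity on ASCII)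
def normChar (c : Char) : Char :=
  match c with
  | 'ı' => 'i' | 'ğ' => 'g' | 'ü' => 'u' | 'ş' => 's' | 'ö' => 'o' | 'ç' => 'c'
  | 'İ' => 'I' | 'Ğ' => 'G' | 'Ü' => 'U' | 'Ş' => 'S' | 'Ö' => 'O' | 'Ç' => 'C'
  | c => c

def normalize_text (text : String) : String :=
  String.ofList (text.toList.map normChar)

-- the while loop of A: index i, lookahead b, stride 1 or 2
def pfLoopA (cleaned : List Char) (i : Nat) (pairs : List (String × String)) :
    List (String × String) :=
  if h : i < cleaned.length then
    let a := String.ofList [cleaned[i]]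
    let b := if h2 : i + 1 < cleaned.length then String.ofList [cleaned[i + 1]] else ""
    if a = b then
      pfLoopA cleaned (i + 1) (pairs ++ [(a, "x")])
    else
      if b ≠ "" then
        pfLoopA cleaned (i + 2) (pairs ++ [(a, b)])
      else
        pfLoopA cleaned (i + 1) (pairs ++ [(a, "x")])
  else pairs
termination_by cleaned.length - i
decreasing_by all_goals omega

def playfair_prepare_text (text : String) : List (String × String) :=
  let t := normalize_text (PySem.Str.replace (PySem.Str.lower text) "j" "i")
  let cleaned := t.toList.filter (fun c => PySem.Chars.isalpha c)
  pfLoopA cleaned 0 []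

-- ===== PORT B =====
-- one step of B's pass, given that c survived the isalpha filter
def pfStepCore (st : List (String × String) × Option Char) (c : Char) :
    List (String × String) × Option Char :=
  match st.2 with
  | none => (st.1, some c)
  | some p =>
      if p = c then (st.1 ++ [(String.ofList [p], "x")], some c)
      else (st.1 ++ [(String.ofList [p], String.ofList [c])], none)

-- B's loop body: 'if not c.isalpha(): continue' then the pending-update
def pfStep (st : List (String × String) × Option Char) (c : Char) :
    List (String × String) × Option Char :=
  if PySem.Chars.isalpha c = false then st else pfStepCore st c

-- the final 'if pending is not None: pairs.append((pending, 'x'))'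
def pfFinish (st : List (String × String) × Option Char) : List (String × String) :=
  match st.2 with
  | none => st.1
  | some p => st.1 ++ [(String.ofList [p], "x")]

def playfair_prepare_text_alt (text : String) : List (String × String) :=
  let t := normalize_text (PySem.Str.replace (PySem.Str.lower text) "j" "i")
  pfFinish (t.toList.foldl pfStep ([], none))

-- ===== PRECONDITION & SPEC =====
def Spec_playfair_prepare_text (text : String) (out : List (String × String)) : Prop := out = playfair_prepare_text_alt text
instance (text : String) (out : List (String × String)) : Decidable (Spec_playfair_prepare_text text out) := by unfold Spec_playfair_prepare_text; infer_instance

-- ===== CLAIM (what is proved, stated in full; the proofs are below) =====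
def Claim_equal_playfair_prepare_text : Prop := ∀ (text : String), Dom_playfair_prepare_text text → Spec_playfair_prepare_text text (playfair_prepare_text text)

-- ===== LEMMAS AND PROOFS =====
-- common reference: the digraph pairing of a cleaned character list
def pairsRec : List Char → List (String × String)
  | [] => []
  | [a] => [(String.ofList [a], "x")]
  | a :: b :: rest =>
      if a = b then (String.ofList [a], "x") :: pairsRec (b :: rest)
      else (String.ofList [a], String.ofList [b]) :: pairsRec rest

theorem ofList_singleton_ne_empty (c : Char) : String.ofList [c] ≠ "" := by
  intro h
  rw [show ("" : String) = String.ofList [] from rfl] at h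
  exact absurd (String.ofList_inj.mp h) (by simp)

theorem pfLoopA_eq (n : Nat) (cleaned : List Char) (i : Nat)
    (pairs : List (String × String)) (hn : cleaned.length - i ≤ n) :
    pfLoopA cleaned i pairs = pairs ++ pairsRec (cleaned.drop i) := by
  induction n generalizing i pairs with
  | zero =>
      rw [pfLoopA]
      have h : ¬ i < cleaned.length := by omega
      simp [h, List.drop_eq_nil_of_le (by omega : cleaned.length ≤ i), pairsRec]
  | succ n ih =>
      rw [pfLoopA]
      by_cases h : i < cleaned.length
      · have hd : cleaned.drop i = cleaned[i] :: cleaned.drop (i + 1) :=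
          List.drop_eq_getElem_cons h
        by_cases h2 : i + 1 < cleaned.length
        · have hd2 : cleaned.drop (i + 1) = cleaned[i + 1] :: cleaned.drop (i + 2) :=
            List.drop_eq_getElem_cons h2
          by_cases heq : cleaned[i] = cleaned[i + 1]
          · simp only [h, h2, dif_pos]
            rw [if_pos (by rw [heq])]
            rw [ih (i + 1) _ (by omega)]
            rw [hd, hd2, pairsRec, if_pos heq, heq, ← hd2]
            simp
          · have hne : String.ofList [cleaned[i]] ≠ String.ofList [cleaned[i + 1]] := by
              rw [Ne, String.ofList_inj]; simp [heq]
            simp only [h, h2, dif_pos]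
            rw [if_neg hne, if_pos (ofList_singleton_ne_empty _)]
            rw [ih (i + 2) _ (by omega)]
            rw [hd, hd2, pairsRec, if_neg heq]
            simp
        · have hd2 : cleaned.drop (i + 1) = [] :=
            List.drop_eq_nil_of_le (by omega)
          simp only [h, dif_pos, h2, dif_neg, not_false_iff]
          rw [if_neg (ofList_singleton_ne_empty _), if_neg (by simp)]
          rw [ih (i + 1) _ (by omega)]
          rw [hd, hd2]
          simp [pairsRec]
      · have hd : cleaned.drop i = [] := List.drop_eq_nil_of_le (by omega)
        simp [h, hd, pairsRec]

theorem foldl_core_eq (l : List Char) :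
    (∀ (pairs : List (String × String)) (p : Char),
        pfFinish (l.foldl pfStepCore (pairs, some p)) = pairs ++ pairsRec (p :: l)) ∧
    (∀ (pairs : List (String × String)),
        pfFinish (l.foldl pfStepCore (pairs, none)) = pairs ++ pairsRec l) := by
  induction l with
  | nil =>
      constructor
      · intro pairs p; simp [pfFinish, pairsRec]
      · intro pairs; simp [pfFinish, pairsRec]
  | cons c l ih =>
      constructor
      · intro pairs p
        by_cases heq : p = c
        · simp only [List.foldl_cons, pfStepCore, if_pos heq]
          rw [ih.1]
          rw [pairsRec, if_pos heq, heq]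
          simp
        · simp only [List.foldl_cons, pfStepCore, if_neg heq]
          rw [ih.2]
          rw [pairsRec, if_neg heq]
          simp
      · intro pairs
        simp only [List.foldl_cons, pfStepCore]
        exact ih.1 pairs c

theorem foldl_pfStep_eq (l : List Char) (st : List (String × String) × Option Char) :
    l.foldl pfStep st = (l.filter (fun c => PySem.Chars.isalpha c)).foldl pfStepCore st := by
  rw [List.foldl_filter]
  congr 1
  funext s c
  by_cases h : PySem.Chars.isalpha c <;> simp [pfStep, h]

theorem both_eq_pairsRec (text : String) :
    playfair_prepare_text text = playfair_prepare_text_alt text := by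
  have hA : playfair_prepare_text text =
      pfLoopA ((normalize_text (PySem.Str.replace (PySem.Str.lower text) "j" "i")).toList.filter
        (fun c => PySem.Chars.isalpha c)) 0 [] := rfl
  have hB : playfair_prepare_text_alt text =
      pfFinish ((normalize_text (PySem.Str.replace (PySem.Str.lower text) "j" "i")).toList.foldl
        pfStep ([], none)) := by
    simp only [playfair_prepare_text_alt]
  rw [hA, hB, foldl_pfStep_eq, (foldl_core_eq _).2,
      pfLoopA_eq ((normalize_text (PySem.Str.replace (PySem.Str.lower text) "j" "i")).toList.filter
        (fun c => PySem.Chars.isalpha c)).length _ 0 [] (by omega),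
      List.drop_zero]

-- ===== VERDICT (by name: the statement is the Claim_ definition above) =====
theorem playfair_prepare_text_spec : Claim_equal_playfair_prepare_text :=
  fun text _ => both_eq_pairsRec text
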